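-- pv_equiv track=rewrite | github.com/hansxiao7/leetcode-python | 0090--Subsets II/solution1-DFS.py | helper
-- ===== SOURCE A (Python) =====
-- def helper(nums, m, k):
--     result = []
--     if k == 0:
--         result.append([])
--         return result
--
--     for i in range(m, len(nums) - k + 1):
--         if i != m and nums[i - 1] == nums[i]:
--             continue
--         temp = helper(nums, i + 1, k - 1)
--         for j in range(len(temp)):
--             temp2 = [nums[i]]
--             temp2.extend(temp[j])
--             result.append(temp2)
--
--     return result
-- ===== SOURCE B (Python) =====
-- def helper(nums, m, k):
--     n = len(nums)
--     # iterative level-wise (breadth-first) expansion: frontier of (next start, chosen values)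
--     frontier = [(m, [])]
--     for depth in range(k):
--         if not frontier:
--             break
--         nxt = []
--         for start, vals in frontier:
--             for i in range(start, n - (k - depth - 1)):
--                 if i != start and nums[i - 1] == nums[i]:
--                     continue
--                 nxt.append((i + 1, vals + [nums[i]]))
--         frontier = nxt
--     return [vals for _, vals in frontier]
-- ===== Notes on version B (the rewrite author's own statement) =====
-- stated objective: alternative
-- what changed: Replaces A's recursive DFS (suffix decomposition per chosen element) with an iterative breadth-first level expansion: an explicit frontier of (next-start, chosen-values) pairs is expanded k times with the same duplicate-skip rule, no recursion.
-- outside the precondition, e.g. on helper([], 5, -3): A returns [], B returns [[]]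
import Mathlib
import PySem

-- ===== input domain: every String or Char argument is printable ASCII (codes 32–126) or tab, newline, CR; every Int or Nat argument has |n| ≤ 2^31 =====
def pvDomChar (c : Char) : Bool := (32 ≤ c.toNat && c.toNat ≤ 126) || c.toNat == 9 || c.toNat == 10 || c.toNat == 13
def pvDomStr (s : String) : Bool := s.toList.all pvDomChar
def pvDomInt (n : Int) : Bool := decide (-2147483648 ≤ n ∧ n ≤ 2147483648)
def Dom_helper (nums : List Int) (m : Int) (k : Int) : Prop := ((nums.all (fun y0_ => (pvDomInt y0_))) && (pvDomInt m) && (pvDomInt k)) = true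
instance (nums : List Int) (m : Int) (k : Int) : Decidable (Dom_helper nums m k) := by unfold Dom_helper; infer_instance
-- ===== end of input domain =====

-- B replaces A's recursive DFS by an iterative breadth-first frontier expansion (same duplicate-skip rule); objective: alternative.

-- ===== PORT A =====
-- A's recursion terminates because k decreases to 0; the port uses the fuel k.toNat (Pre_ requires 0 ≤ k).
def helperA (nums : List Int) : Int → Nat → List (List Int)
  | _, 0 => [[]]                                      -- result = []; if k == 0: result.append([]); return result
  | m, K + 1 =>                                       -- for i in range(m, len(nums) - k + 1): …
      (PySem.List.pyRange m ((PySem.List.len nums) - ((K : Int) + 1) + 1) 1).foldl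
        (fun acc i =>
          if i ≠ m ∧ PySem.List.pyGetD nums (i - 1) 0 = PySem.List.pyGetD nums i 0 then acc   -- continue
          else acc ++ (helperA nums (i + 1) K).map (fun t => PySem.List.pyGetD nums i 0 :: t)) -- temp2 = [nums[i]]; temp2.extend(temp[j]); result.append(temp2)
        []

def helper (nums : List Int) (m : Int) (k : Int) : List (List Int) := helperA nums m k.toNat

-- ===== PORT B =====
-- one level of expansion: nxt = []; for (start, vals) in frontier: for i in range(start, bound): … nxt.append(...)
def altStep (nums : List Int) (bound : Int) (fr : List (Int × List Int)) : List (Int × List Int) :=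
  fr.foldl (fun nxt p =>
    (PySem.List.pyRange p.1 bound 1).foldl (fun nxt i =>
      if i ≠ p.1 ∧ PySem.List.pyGetD nums (i - 1) 0 = PySem.List.pyGetD nums i 0 then nxt
      else nxt ++ [(i + 1, p.2 ++ [PySem.List.pyGetD nums i 0])]) nxt) []

-- the `for depth in range(k)` loop with its `if not frontier: break` early exit;
-- `remaining` counts the iterations left (depth + remaining = k)
def altLoop (nums : List Int) (k : Int) : Nat → Nat → List (Int × List Int) → List (Int × List Int)
  | _, 0, fr => fr
  | depth, r + 1, fr =>
      if fr = [] then fr   -- if not frontier: break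
      else altLoop nums k (depth + 1) r (altStep nums ((PySem.List.len nums) - (k - (depth : Int) - 1)) fr)

def helper_alt (nums : List Int) (m : Int) (k : Int) : List (List Int) :=
  (altLoop nums k 0 k.toNat [(m, [])]).map (·.2)

-- ===== PRECONDITION & SPEC =====
-- Pre_ excludes (a) negative k, where A recurses forever (RecursionError) except when the index range is
-- already empty and it accidentally returns [], and (b) m < -len(nums) with k ≥ 1 and a nonempty range,
-- where A's negative indexing raises IndexError.
def Pre_helper (nums : List Int) (m : Int) (k : Int) : Prop :=
  0 ≤ k ∧ (k = 0 ∨ -(nums.length : Int) ≤ m ∨ (nums.length : Int) - k < m)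
instance (nums : List Int) (m : Int) (k : Int) : Decidable (Pre_helper nums m k) := by unfold Pre_helper; infer_instance

def pvWitness_helper : List Int × Int × Int := ([1, 2, 2], 0, 2)

def Spec_helper (nums : List Int) (m : Int) (k : Int) (out : List (List Int)) : Prop := out = helper_alt nums m k
instance (nums : List Int) (m : Int) (k : Int) (out : List (List Int)) : Decidable (Spec_helper nums m k out) := by unfold Spec_helper; infer_instance

-- ===== CLAIM (what is proved, stated in full; the proofs are below) =====
def Claim_equal_helper : Prop := ∀ (nums : List Int) (m : Int) (k : Int), Dom_helper nums m k → Pre_helper nums m k → Spec_helper nums m k (helper nums m k)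

-- ===== LEMMAS AND PROOFS =====

-- common loop shape of both ports: skip-or-extend folding (the `continue` branch keeps acc)
theorem foldl_skip_append {α β : Type} (p : α → Prop) [DecidablePred p] (g : α → List β) :
    ∀ (l : List α) (acc : List β),
      l.foldl (fun acc x => if p x then acc else acc ++ g x) acc =
        acc ++ l.flatMap (fun x => if p x then [] else g x) := by
  intro l
  induction l with
  | nil => intro acc; simp
  | cons x xs ih =>
      intro acc
      simp only [List.foldl_cons, List.flatMap_cons, ih]
      split <;> simp

-- A's level loop in flatMap form
theorem helperA_succ (nums : List Int) (m : Int) (K : Nat) :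
    helperA nums m (K + 1) =
      (PySem.List.pyRange m ((PySem.List.len nums) - (K : Int)) 1).flatMap
        (fun i =>
          if i ≠ m ∧ PySem.List.pyGetD nums (i - 1) 0 = PySem.List.pyGetD nums i 0 then []
          else (helperA nums (i + 1) K).map (fun t => PySem.List.pyGetD nums i 0 :: t)) := by
  show (PySem.List.pyRange m ((PySem.List.len nums) - ((K : Int) + 1) + 1) 1).foldl _ [] = _
  have harith : (PySem.List.len nums) - ((K : Int) + 1) + 1 = (PySem.List.len nums) - (K : Int) := by ring
  rw [harith]
  simpa using foldl_skip_append
    (fun i => i ≠ m ∧ PySem.List.pyGetD nums (i - 1) 0 = PySem.List.pyGetD nums i 0)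
    (fun i => (helperA nums (i + 1) K).map (fun t => PySem.List.pyGetD nums i 0 :: t))
    (PySem.List.pyRange m ((PySem.List.len nums) - (K : Int)) 1) []

-- B's one-level expansion in flatMap form
theorem altStep_eq (nums : List Int) (bound : Int) (fr : List (Int × List Int)) :
    altStep nums bound fr =
      fr.flatMap (fun p =>
        (PySem.List.pyRange p.1 bound 1).flatMap (fun i =>
          if i ≠ p.1 ∧ PySem.List.pyGetD nums (i - 1) 0 = PySem.List.pyGetD nums i 0 then []
          else [(i + 1, p.2 ++ [PySem.List.pyGetD nums i 0])])) := by
  show fr.foldl _ [] = _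
  have inner : ∀ (acc : List (Int × List Int)) (p : Int × List Int),
      (PySem.List.pyRange p.1 bound 1).foldl (fun nxt i =>
        if i ≠ p.1 ∧ PySem.List.pyGetD nums (i - 1) 0 = PySem.List.pyGetD nums i 0 then nxt
        else nxt ++ [(i + 1, p.2 ++ [PySem.List.pyGetD nums i 0])]) acc =
      acc ++ (PySem.List.pyRange p.1 bound 1).flatMap (fun i =>
        if i ≠ p.1 ∧ PySem.List.pyGetD nums (i - 1) 0 = PySem.List.pyGetD nums i 0 then []
        else [(i + 1, p.2 ++ [PySem.List.pyGetD nums i 0])]) := by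
    intro acc p
    simpa using foldl_skip_append
      (fun i => i ≠ p.1 ∧ PySem.List.pyGetD nums (i - 1) 0 = PySem.List.pyGetD nums i 0)
      (fun i => [(i + 1, p.2 ++ [PySem.List.pyGetD nums i 0])])
      (PySem.List.pyRange p.1 bound 1) acc
  rw [PySem.List.foldl_congr_mem fr _ _ [] (fun acc p _ => inner acc p)]
  simpa using PySem.List.foldl_append_eq_flatMap _ fr []

-- expanding the frontier one level commutes with finishing the search by A's recursion
theorem exchange (nums : List Int) (K : Nat) (fr : List (Int × List Int)) :
    (altStep nums ((PySem.List.len nums) - (K : Int)) fr).flatMap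
        (fun p => (helperA nums p.1 K).map (fun t => p.2 ++ t)) =
      fr.flatMap (fun p => (helperA nums p.1 (K + 1)).map (fun t => p.2 ++ t)) := by
  rw [altStep_eq, List.flatMap_assoc]
  refine List.flatMap_congr ?_
  intro p _
  rw [helperA_succ, List.map_flatMap, List.flatMap_assoc]
  refine List.flatMap_congr ?_
  intro i _
  split
  · simp
  · simp [List.map_map, Function.comp_def, List.append_assoc]

-- the whole B loop, related level by level to A's recursion
theorem loop_lemma (nums : List Int) (k : Int) (hk : 0 ≤ k) :
    ∀ (K d : Nat) (fr : List (Int × List Int)), d + K = k.toNat →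
      (altLoop nums k d K fr).flatMap (fun p => (helperA nums p.1 0).map (fun t => p.2 ++ t)) =
        fr.flatMap (fun p => (helperA nums p.1 K).map (fun t => p.2 ++ t)) := by
  intro K
  induction K with
  | zero => intro d fr _; rfl
  | succ r ih =>
      intro d fr hd
      show (if fr = [] then fr else altLoop nums k (d + 1) r
              (altStep nums ((PySem.List.len nums) - (k - (d : Int) - 1)) fr)).flatMap _ = _
      by_cases hfr : fr = []
      · simp [hfr]
      · rw [if_neg hfr]
        have hbnd : k - (d : Int) - 1 = ((r : Nat) : Int) := by omega
        rw [hbnd, ih (d + 1) _ (by omega)]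
        exact exchange nums r fr

theorem flatMap_snd {α β : Type} (l : List (α × β)) : l.flatMap (fun p => [p.2]) = l.map (·.2) := by
  induction l with
  | nil => rfl
  | cons x xs ih => simp [ih]

-- ===== VERDICT (by name: the statement is the Claim_ definition above) =====
theorem helper_spec : Claim_equal_helper := by
  intro nums m k _ hpre
  show helper nums m k = helper_alt nums m k
  have hk : 0 ≤ k := hpre.1
  unfold helper helper_alt
  have h := loop_lemma nums k hk k.toNat 0 [(m, [])] (by omega)
  have hL : ∀ (l : List (Int × List Int)),
      l.flatMap (fun p => (helperA nums p.1 0).map (fun t => p.2 ++ t)) = l.map (·.2) := by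
    intro l
    rw [← flatMap_snd l]
    refine List.flatMap_congr ?_
    intro p _
    show (helperA nums p.1 0).map (fun t => p.2 ++ t) = [p.2]
    rw [show helperA nums p.1 0 = [[]] from rfl]
    simp
  rw [hL] at h
  rw [h]
  simp
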